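-- pv_equiv track=rewrite | github.com/nicola-king/openclaw-workspace | skills/turboquant/test/test_compressor.py | _generate_long_conversation
-- ===== SOURCE A (Python) =====
-- def _generate_long_conversation(line_count: int) -> str:
--     """生成指定行数的对话"""
--     lines = []
--     topics = ['项目进度', '技术讨论', '代码审查', '文档更新', '测试计划']
--
--     for i in range(line_count):
--         speaker = "SAYELF" if i % 2 == 0 else "太一"
--         topic = topics[i % len(topics)]
--
--         if i % 10 == 0:
--             lines.append(f"{speaker}: 决定执行 TASK-{i:03d} 任务")
--         elif i % 10 == 1:
--             lines.append(f"{speaker}: 必须包含{topic}内容")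
--         elif i % 10 == 2:
--             lines.append(f"{speaker}: 需要帮我处理{topic}")
--         elif i % 10 == 3:
--             lines.append(f"{speaker}: 创建{topic}相关文件")
--         else:
--             lines.append(f"{speaker}: 关于{topic}的讨论 {i}")
--
--     return '\n'.join(lines)
-- ===== SOURCE B (Python) =====
-- # Same output via a fully pre-specialised residue table: line i depends only on
-- # i % 10 (speaker parity and topic index are determined by it) plus i itself,
-- # so the ten possible line shapes are baked once and the loop is a table lookup.
-- _PRE = [
--     lambda i: f"SAYELF: 决定执行 TASK-{i:03d} 任务",
--     lambda i: "太一: 必须包含技术讨论内容",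
--     lambda i: "SAYELF: 需要帮我处理代码审查",
--     lambda i: "太一: 创建文档更新相关文件",
--     lambda i: f"SAYELF: 关于测试计划的讨论 {i}",
--     lambda i: f"太一: 关于项目进度的讨论 {i}",
--     lambda i: f"SAYELF: 关于技术讨论的讨论 {i}",
--     lambda i: f"太一: 关于代码审查的讨论 {i}",
--     lambda i: f"SAYELF: 关于文档更新的讨论 {i}",
--     lambda i: f"太一: 关于测试计划的讨论 {i}",
-- ]
--
-- def _generate_long_conversation(line_count: int) -> str:
--     return '\n'.join(_PRE[i % 10](i) for i in range(line_count))
-- ===== Notes on version B (the rewrite author's own statement) =====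
-- stated objective: simpler
-- what changed: B partially evaluates the loop body: each line depends only on the residue of i modulo ten (which fixes speaker parity and topic index) plus i itself, so the if/elif ladder, parity test and topic lookup are replaced by a ten-entry pre-specialised template table and the function body shrinks to a single join over a table lookup.
import Mathlib
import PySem

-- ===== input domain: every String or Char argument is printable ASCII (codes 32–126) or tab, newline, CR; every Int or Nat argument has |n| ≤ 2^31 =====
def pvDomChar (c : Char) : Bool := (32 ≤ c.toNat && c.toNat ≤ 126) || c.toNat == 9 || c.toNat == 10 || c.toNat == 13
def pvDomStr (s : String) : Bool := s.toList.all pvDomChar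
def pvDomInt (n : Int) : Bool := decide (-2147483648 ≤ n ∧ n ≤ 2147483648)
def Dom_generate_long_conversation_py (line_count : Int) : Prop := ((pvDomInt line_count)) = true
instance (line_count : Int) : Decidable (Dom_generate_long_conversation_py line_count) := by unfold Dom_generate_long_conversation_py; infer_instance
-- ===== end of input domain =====

-- B replaces A's per-iteration parity test / topic lookup / if-elif ladder by a
-- pre-specialised ten-entry template table indexed by i % 10 (objective: simpler).

-- shared helper: Python's f"{i:03d}" (zero-pad to width 3; both sources only format i ≥ 0)
def pvPad3 (i : Int) : String :=
  String.ofList (List.replicate (3 - (PySem.Int.toChars i).length) '0' ++ PySem.Int.toChars i)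

-- ===== PORT A =====
def generate_long_conversation_py (line_count : Int) : String :=
  let topics : List String := ["项目进度", "技术讨论", "代码审查", "文档更新", "测试计划"]
  let lines : List String :=
    (PySem.List.pyRange 0 line_count 1).foldl (fun acc i =>
      let speaker : String := if PySem.Int.mod i 2 == 0 then "SAYELF" else "太一"
      let topic : String := PySem.List.pyGetD topics (PySem.Int.mod i 5) ""
      if PySem.Int.mod i 10 == 0 then
        acc ++ [speaker ++ ": 决定执行 TASK-" ++ pvPad3 i ++ " 任务"]
      else if PySem.Int.mod i 10 == 1 then
        acc ++ [speaker ++ ": 必须包含" ++ topic ++ "内容"]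
      else if PySem.Int.mod i 10 == 2 then
        acc ++ [speaker ++ ": 需要帮我处理" ++ topic]
      else if PySem.Int.mod i 10 == 3 then
        acc ++ [speaker ++ ": 创建" ++ topic ++ "相关文件"]
      else
        acc ++ [speaker ++ ": 关于" ++ topic ++ "的讨论 " ++ PySem.Int.toStr i]) []
  PySem.Str.join "\n" lines

-- ===== PORT B =====
def pvPre : List (Int → String) :=
  [ fun i => "SAYELF: 决定执行 TASK-" ++ pvPad3 i ++ " 任务",
    fun _ => "太一: 必须包含技术讨论内容",
    fun _ => "SAYELF: 需要帮我处理代码审查",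
    fun _ => "太一: 创建文档更新相关文件",
    fun i => "SAYELF: 关于测试计划的讨论 " ++ PySem.Int.toStr i,
    fun i => "太一: 关于项目进度的讨论 " ++ PySem.Int.toStr i,
    fun i => "SAYELF: 关于技术讨论的讨论 " ++ PySem.Int.toStr i,
    fun i => "太一: 关于代码审查的讨论 " ++ PySem.Int.toStr i,
    fun i => "SAYELF: 关于文档更新的讨论 " ++ PySem.Int.toStr i,
    fun i => "太一: 关于测试计划的讨论 " ++ PySem.Int.toStr i ]

def generate_long_conversation_py_alt (line_count : Int) : String :=
  PySem.Str.join "\n"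
    ((PySem.List.pyRange 0 line_count 1).map (fun i =>
      PySem.List.pyGetD pvPre (PySem.Int.mod i 10) (fun _ => "") i))

-- ===== PRECONDITION & SPEC =====
def Spec_generate_long_conversation_py (line_count : Int) (out : String) : Prop := out = generate_long_conversation_py_alt line_count
instance (line_count : Int) (out : String) : Decidable (Spec_generate_long_conversation_py line_count out) := by unfold Spec_generate_long_conversation_py; infer_instance

-- ===== CLAIM (what is proved, stated in full; the proofs are below) =====
def Claim_equal_generate_long_conversation_py : Prop := ∀ (line_count : Int), Dom_generate_long_conversation_py line_count → Spec_generate_long_conversation_py line_count (generate_long_conversation_py line_count)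

-- ===== LEMMAS AND PROOFS =====


-- proof-side name for A's loop body (one line)
def pvLineA (i : Int) : String :=
  let speaker : String := if PySem.Int.mod i 2 == 0 then "SAYELF" else "太一"
  let topic : String := PySem.List.pyGetD ["项目进度", "技术讨论", "代码审查", "文档更新", "测试计划"] (PySem.Int.mod i 5) ""
  if PySem.Int.mod i 10 == 0 then
    speaker ++ ": 决定执行 TASK-" ++ pvPad3 i ++ " 任务"
  else if PySem.Int.mod i 10 == 1 then
    speaker ++ ": 必须包含" ++ topic ++ "内容"
  else if PySem.Int.mod i 10 == 2 then
    speaker ++ ": 需要帮我处理" ++ topic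
  else if PySem.Int.mod i 10 == 3 then
    speaker ++ ": 创建" ++ topic ++ "相关文件"
  else
    speaker ++ ": 关于" ++ topic ++ "的讨论 " ++ PySem.Int.toStr i

theorem pv_line_eq (i : Int) :
    pvLineA i = PySem.List.pyGetD pvPre (PySem.Int.mod i 10) (fun _ => "") i := by
  have h10 : PySem.Int.mod i 10 = i % 10 := PySem.Int.mod_eq_emod_of_pos (by omega)
  have h2 : PySem.Int.mod i 2 = i % 10 % 2 := by
    rw [PySem.Int.mod_eq_emod_of_pos (by omega), Int.emod_emod_of_dvd i (by norm_num)]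
  have h5 : PySem.Int.mod i 5 = i % 10 % 5 := by
    rw [PySem.Int.mod_eq_emod_of_pos (by omega), Int.emod_emod_of_dvd i (by norm_num)]
  have hr : i % 10 = 0 ∨ i % 10 = 1 ∨ i % 10 = 2 ∨ i % 10 = 3 ∨ i % 10 = 4 ∨
      i % 10 = 5 ∨ i % 10 = 6 ∨ i % 10 = 7 ∨ i % 10 = 8 ∨ i % 10 = 9 := by omega
  simp only [pvLineA, h10, h2, h5]
  rcases hr with h|h|h|h|h|h|h|h|h|h <;> rw [h] <;>
    norm_num [pvPre, PySem.List.pyGetD, PySem.List.pyGet?, PySem.List.pyIdx?] <;> congr 1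

-- ===== VERDICT (by name: the statement is the Claim_ definition above) =====
theorem generate_long_conversation_py_spec : Claim_equal_generate_long_conversation_py := by
  intro n _
  unfold Spec_generate_long_conversation_py generate_long_conversation_py generate_long_conversation_py_alt
  have hbody :
      (fun (acc : List String) (i : Int) =>
        let speaker : String := if PySem.Int.mod i 2 == 0 then "SAYELF" else "太一"
        let topic : String := PySem.List.pyGetD ["项目进度", "技术讨论", "代码审查", "文档更新", "测试计划"] (PySem.Int.mod i 5) ""
        if PySem.Int.mod i 10 == 0 then
          acc ++ [speaker ++ ": 决定执行 TASK-" ++ pvPad3 i ++ " 任务"]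
        else if PySem.Int.mod i 10 == 1 then
          acc ++ [speaker ++ ": 必须包含" ++ topic ++ "内容"]
        else if PySem.Int.mod i 10 == 2 then
          acc ++ [speaker ++ ": 需要帮我处理" ++ topic]
        else if PySem.Int.mod i 10 == 3 then
          acc ++ [speaker ++ ": 创建" ++ topic ++ "相关文件"]
        else
          acc ++ [speaker ++ ": 关于" ++ topic ++ "的讨论 " ++ PySem.Int.toStr i])
      = fun acc i => acc ++ [pvLineA i] := by
    funext acc i
    simp only [pvLineA]
    split_ifs <;> rfl
  simp only [hbody]
  rw [PySem.List.foldl_append_singleton_eq_map]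
  simp only [List.nil_append]
  congr 1
  exact List.map_congr_left (fun i _ => pv_line_eq i)
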